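-- pv_equiv track=rewrite | github.com/assassinuss/First_Apps | bjt.py | draw_cards
-- ===== SOURCE A (Python) =====
-- NAMES = {11: 'A', 10: '10', 9: '9', 8: '8', 7: '7', 6: '6', 5: '5', 4: '4', 3: '3', 2: '2'}
--
-- def draw_cards(hand, hide_first=False):
--     top, mid, bot = "", "", ""
--     for i, (val, suit) in enumerate(hand):
--         if hide_first and i == 0:
--             top += "┌─────┐ "
--             mid += "│  ?  │ "
--             bot += "└─────┘ "
--         else:
--             symbol = NAMES[val]
--             top += "┌─────┐ "
--             mid += f"│{symbol:<2}{suit:>2} │ "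
--             bot += "└─────┘ "
--     return f"{top}\n{mid}\n{bot}"
-- ===== SOURCE B (Python) =====
-- NAMES = {11: 'A', 10: '10', 9: '9', 8: '8', 7: '7', 6: '6', 5: '5', 4: '4', 3: '3', 2: '2'}
--
-- def draw_cards(hand, hide_first=False):
--     def rows(cards):
--         # recursively render visible cards back-to-front as a (top, mid, bot) triple
--         if not cards:
--             return ("", "", "")
--         (val, suit) = cards[0]
--         t, m, b = rows(cards[1:])
--         return ("┌─────┐ " + t, f"│{NAMES[val]:<2}{suit:>2} │ " + m, "└─────┘ " + b)
--     if hide_first and hand: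
--         t, m, b = rows(hand[1:])
--         t, m, b = "┌─────┐ " + t, "│  ?  │ " + m, "└─────┘ " + b
--     else:
--         t, m, b = rows(hand)
--     return f"{t}\n{m}\n{b}"
-- ===== Notes on version B (the rewrite author's own statement) =====
-- stated objective: alternative
-- what changed: Replaces A's single forward loop over enumerate that grows three string accumulators (with an i==0 hidden-card branch inside the loop) by a recursive helper that renders only the visible cards back-to-front as a (top,mid,bot) triple by prepending, with the hidden first card handled once outside the recursion; no enumerate/index test remains.
import Mathlib
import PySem

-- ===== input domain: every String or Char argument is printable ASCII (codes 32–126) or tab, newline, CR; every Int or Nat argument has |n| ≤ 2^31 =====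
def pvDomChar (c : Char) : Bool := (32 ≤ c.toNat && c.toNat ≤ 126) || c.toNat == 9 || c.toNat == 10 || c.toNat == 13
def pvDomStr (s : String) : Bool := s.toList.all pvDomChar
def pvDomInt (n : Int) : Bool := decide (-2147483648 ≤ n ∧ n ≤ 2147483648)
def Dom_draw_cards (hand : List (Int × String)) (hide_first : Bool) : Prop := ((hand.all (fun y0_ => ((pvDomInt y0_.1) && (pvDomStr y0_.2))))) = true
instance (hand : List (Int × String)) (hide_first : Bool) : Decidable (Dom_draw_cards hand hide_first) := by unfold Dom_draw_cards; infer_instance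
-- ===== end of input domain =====

-- B replaces A's forward three-accumulator loop by a back-to-front recursion over the visible
-- cards, handling the hidden first card once outside the recursion (objective: alternative).

-- shared module constant NAMES and the pieces of the card art / f-string formatting
def pvNAMES : PySem.Dict Int String :=
  ⟨[(11, "A"), (10, "10"), (9, "9"), (8, "8"), (7, "7"), (6, "6"), (5, "5"), (4, "4"), (3, "3"), (2, "2")]⟩
def pvTopCell : List Char := "┌─────┐ ".toList
def pvHidCell : List Char := "│  ?  │ ".toList
def pvBotCell : List Char := "└─────┘ ".toList
-- {s:<2} / {s:>2}: exact Python format-spec behaviour on any string (pad with spaces up to width 2, no truncation)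
def pvLjust2 (s : List Char) : List Char := s ++ List.replicate (2 - s.length) ' '
def pvRjust2 (s : List Char) : List Char := List.replicate (2 - s.length) ' ' ++ s
-- f"│{symbol:<2}{suit:>2} │ " with symbol = NAMES[val]; the getD default "" is only reached
-- outside Pre_draw_cards (where Python raises KeyError)
def pvFmtCell (val : Int) (suit : String) : List Char :=
  '│' :: pvLjust2 (PySem.Dict.getD pvNAMES val "").toList ++ pvRjust2 suit.toList ++ [' ', '│', ' ']

-- ===== PORT A =====
def draw_cards (hand : List (Int × String)) (hide_first : Bool) : String :=
  let st := (PySem.List.enumerate hand).foldl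
    (fun (s : List Char × List Char × List Char) p =>
      if hide_first && p.1 == 0 then
        (s.1 ++ pvTopCell, s.2.1 ++ pvHidCell, s.2.2 ++ pvBotCell)
      else
        (s.1 ++ pvTopCell, s.2.1 ++ pvFmtCell p.2.1 p.2.2, s.2.2 ++ pvBotCell))
    ([], [], [])
  String.ofList (st.1 ++ '\n' :: st.2.1 ++ '\n' :: st.2.2)

-- ===== PORT B =====
-- rows(cards): recursive back-to-front rendering of the visible cards as a (top, mid, bot) triple
def pvRows : List (Int × String) → List Char × List Char × List Char
  | [] => ([], [], [])
  | (val, suit) :: rest =>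
      let r := pvRows rest
      (pvTopCell ++ r.1, pvFmtCell val suit ++ r.2.1, pvBotCell ++ r.2.2)

def draw_cards_alt (hand : List (Int × String)) (hide_first : Bool) : String :=
  let st :=
    if hide_first && !hand.isEmpty then
      -- hand[1:] on a nonempty list is its tail (PySem.List.slice_from_one)
      let r := pvRows hand.tail
      (pvTopCell ++ r.1, pvHidCell ++ r.2.1, pvBotCell ++ r.2.2)
    else pvRows hand
  String.ofList (st.1 ++ '\n' :: st.2.1 ++ '\n' :: st.2.2)

-- ===== PRECONDITION & SPEC =====
-- Pre_ excludes exactly the hands on which Python A raises KeyError: a non-hidden card whose value is outside NAMES (2..11)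
def Pre_draw_cards (hand : List (Int × String)) (hide_first : Bool) : Prop :=
  ((if hide_first then hand.drop 1 else hand).all (fun c => 2 ≤ c.1 && c.1 ≤ 11)) = true
instance (hand : List (Int × String)) (hide_first : Bool) : Decidable (Pre_draw_cards hand hide_first) := by unfold Pre_draw_cards; infer_instance
def pvWitness_draw_cards : (List (Int × String)) × Bool := ([(11, "S"), (10, "H")], true)

def Spec_draw_cards (hand : List (Int × String)) (hide_first : Bool) (out : String) : Prop := out = draw_cards_alt hand hide_first
instance (hand : List (Int × String)) (hide_first : Bool) (out : String) : Decidable (Spec_draw_cards hand hide_first out) := by unfold Spec_draw_cards; infer_instance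

-- ===== CLAIM (what is proved, stated in full; the proofs are below) =====
def Claim_equal_draw_cards : Prop := ∀ (hand : List (Int × String)) (hide_first : Bool), Dom_draw_cards hand hide_first → Pre_draw_cards hand hide_first → Spec_draw_cards hand hide_first (draw_cards hand hide_first)

-- ===== LEMMAS AND PROOFS =====

-- A's loop with the hidden branch never taken equals B's recursion, for any start index ≥ 1
theorem pv_fold_no_hide (hide : Bool) :
    ∀ (l : List (Int × String)) (s : Int), hide = false ∨ 1 ≤ s → ∀ (t m b : List Char),
    (PySem.List.enumerate l s).foldl
      (fun (acc : List Char × List Char × List Char) p =>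
        if hide && p.1 == 0 then
          (acc.1 ++ pvTopCell, acc.2.1 ++ pvHidCell, acc.2.2 ++ pvBotCell)
        else
          (acc.1 ++ pvTopCell, acc.2.1 ++ pvFmtCell p.2.1 p.2.2, acc.2.2 ++ pvBotCell))
      (t, m, b)
    = (t ++ (pvRows l).1, m ++ (pvRows l).2.1, b ++ (pvRows l).2.2) := by
  intro l
  induction l with
  | nil => intro s hs t m b; simp [PySem.List.enumerate_nil, pvRows]
  | cons x xs ih =>
      intro s hs t m b
      obtain ⟨val, suit⟩ := x
      rw [PySem.List.enumerate_cons, List.foldl_cons]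
      have hne : (hide && s == 0) = false := by
        rcases hs with h | h
        · simp [h]
        · cases hide <;> simp; omega
      rw [hne]
      rw [ih (s + 1) (by rcases hs with h | h; exact Or.inl h; exact Or.inr (by omega))]
      simp [pvRows]

-- ===== VERDICT (by name: the statement is the Claim_ definition above) =====
theorem draw_cards_spec : Claim_equal_draw_cards := by
  intro hand hide _ _
  unfold Spec_draw_cards draw_cards draw_cards_alt
  cases hand with
  | nil => cases hide <;> simp [PySem.List.enumerate_nil, pvRows]
  | cons x xs =>
      obtain ⟨val, suit⟩ := x
      cases hide with
      | false =>
          rw [pv_fold_no_hide false ((val, suit) :: xs) 0 (Or.inl rfl)]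
          simp [pvRows]
      | true =>
          simp only [List.isEmpty_cons, Bool.not_false, Bool.and_true, List.tail_cons]
          rw [PySem.List.enumerate_cons, List.foldl_cons]
          simp only [if_pos (by simp : (true && (0:Int) == 0) = true)]
          rw [show ((0:Int)+1) = 1 from rfl, pv_fold_no_hide true xs 1 (Or.inr (by omega))]
          simp
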